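-- pv_equiv track=rewrite | github.com/nikhilsrajan/cpp_include_dependencies | cpp_include_dependency.py | get_dependency_count
-- ===== SOURCE A (Python) =====
-- from typing import List
-- from typing import Tuple
-- from typing import Dict
--
-- def get_dependency_count(dependent_dependeny_tuple_list:List[Tuple[str, str]]) -> Dict[str, int]:
--     dependency_count = dict()
--
--     # init
--     for cur_tuple in dependent_dependeny_tuple_list:
--         dependent = list(cur_tuple)[0]
--         dependency = list(cur_tuple)[1]
--         dependency_count[dependent] = 0
--         dependency_count[dependency] = 0
--
--     for cur_tuple in dependent_dependeny_tuple_list: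
--         dependency = list(cur_tuple)[1]
--         dependency_count[dependency] += 1
--
--     return dependency_count
-- ===== SOURCE B (Python) =====
-- def get_dependency_count(dependent_dependeny_tuple_list):
--     # keys-then-count: collect distinct keys in first-occurrence order,
--     # then count each key's appearances in second position by scanning the list
--     seen = []
--     for t in dependent_dependeny_tuple_list:
--         if t[0] not in seen:
--             seen.append(t[0])
--         if t[1] not in seen:
--             seen.append(t[1])
--     return {k: sum(1 for t in dependent_dependeny_tuple_list if t[1] == k)
--             for k in seen}
-- ===== Notes on version B (the rewrite author's own statement) =====
-- stated objective: alternative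
-- what changed: Replaces A's dict-based zero-init pass plus in-place increment pass with a keys-then-count scheme: a list of distinct keys in first-occurrence order is collected, then the result is built by a comprehension that counts each key's second-position appearances with a direct scan of the tuple list (no mutable counter dict at all).
import Mathlib
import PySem

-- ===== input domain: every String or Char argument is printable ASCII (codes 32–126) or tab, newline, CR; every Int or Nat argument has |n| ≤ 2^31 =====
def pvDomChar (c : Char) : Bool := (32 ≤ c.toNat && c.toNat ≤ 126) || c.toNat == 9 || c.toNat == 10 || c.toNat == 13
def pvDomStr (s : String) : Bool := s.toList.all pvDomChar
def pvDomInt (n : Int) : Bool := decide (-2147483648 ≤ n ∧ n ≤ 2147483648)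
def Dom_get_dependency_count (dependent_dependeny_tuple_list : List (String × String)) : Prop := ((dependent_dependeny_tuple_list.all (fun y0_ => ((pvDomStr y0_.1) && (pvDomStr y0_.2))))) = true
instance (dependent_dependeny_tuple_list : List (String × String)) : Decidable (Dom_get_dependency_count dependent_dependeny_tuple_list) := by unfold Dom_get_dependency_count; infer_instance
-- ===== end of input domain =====

-- B replaces A's dict-based init+increment passes by keys-then-count: an ordered distinct-key
-- list followed by a per-key counting scan (no mutable counter dict); same results, different algorithm.

-- ===== PORT A =====
def get_dependency_count (dependent_dependeny_tuple_list : List (String × String)) : List (String × Int) :=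
  -- init loop: dependency_count[dependent] = 0; dependency_count[dependency] = 0
  let d0 : PySem.Dict String Int :=
    dependent_dependeny_tuple_list.foldl
      (fun d t => (d.insert t.1 0).insert t.2 0) PySem.Dict.empty
  -- second loop: dependency_count[dependency] += 1
  -- (the key is always present after the init loop, so 'modify _ 0 (· + 1)' is exact: the
  --  default 0 is never used where Python's 'd[k] += 1' would raise)
  let d1 := dependent_dependeny_tuple_list.foldl
      (fun d t => d.modify t.2 0 (· + 1)) d0
  d1.items

-- ===== PORT B =====
def get_dependency_count_alt (dependent_dependeny_tuple_list : List (String × String)) : List (String × Int) :=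
  -- seen: 'if t[i] not in seen: seen.append(t[i])' — exactly PySem.Set.add on a list
  let seen : PySem.Set String :=
    dependent_dependeny_tuple_list.foldl
      (fun s t => PySem.Set.add (PySem.Set.add s t.1) t.2) PySem.Set.empty
  -- {k: sum(1 for t in lst if t[1] == k) for k in seen}
  seen.map (fun k =>
    (k, ((dependent_dependeny_tuple_list.filter (fun t => t.2 == k)).length : Int)))

-- ===== PRECONDITION & SPEC =====
def Spec_get_dependency_count (dependent_dependeny_tuple_list : List (String × String)) (out : List (String × Int)) : Prop := out = get_dependency_count_alt dependent_dependeny_tuple_list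
instance (dependent_dependeny_tuple_list : List (String × String)) (out : List (String × Int)) : Decidable (Spec_get_dependency_count dependent_dependeny_tuple_list out) := by unfold Spec_get_dependency_count; infer_instance

-- ===== CLAIM =====
def Claim_equal_get_dependency_count : Prop := ∀ (dependent_dependeny_tuple_list : List (String × String)), Dom_get_dependency_count dependent_dependeny_tuple_list → Spec_get_dependency_count dependent_dependeny_tuple_list (get_dependency_count dependent_dependeny_tuple_list)

-- ===== LEMMAS AND PROOFS =====

-- the stream of keys a pass over the tuples touches, in touch order
def pvFlat (xs : List (String × String)) : List String := xs.flatMap (fun t => [t.1, t.2])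

lemma mem_pvFlat_snd (xs : List (String × String)) (t : String × String) (ht : t ∈ xs) :
    t.2 ∈ pvFlat xs := List.mem_flatMap.mpr ⟨t, ht, by simp⟩

-- a two-inserts-per-tuple loop is a one-insert-per-key loop over the flattened key stream
lemma fold2_eq_flat (f : String → Int) (xs : List (String × String)) (d : PySem.Dict String Int) :
    xs.foldl (fun d t => (d.insert t.1 (f t.1)).insert t.2 (f t.2)) d
      = (pvFlat xs).foldl (fun d k => d.insert k (f k)) d := by
  induction xs generalizing d with
  | nil => rfl
  | cons t xs ih => simp [pvFlat, ih, List.flatMap_cons]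

-- lookup through a value-by-function insert loop
lemma getD_fold_insert_fun (f : String → Int) (L : List String) (d : PySem.Dict String Int) (v : String) :
    (L.foldl (fun d k => d.insert k (f k)) d).getD v 0 = if v ∈ L then f v else d.getD v 0 := by
  induction L generalizing d with
  | nil => simp
  | cons a L ih =>
    simp only [List.foldl_cons, ih, PySem.Dict.getD_insert, List.mem_cons]
    by_cases h : v ∈ L
    · simp [h]
    · by_cases h2 : v = a <;> simp [h, h2]

lemma set_update_of_mem (l : List String) (s : PySem.Set String) (h : ∀ x ∈ l, x ∈ s) :
    PySem.Set.update s l = s := by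
  induction l generalizing s with
  | nil => rfl
  | cons x l ih =>
    rw [PySem.Set.update_cons, PySem.Set.add_of_mem (h x (by simp))]
    exact ih s (fun y hy => h y (by simp [hy]))

-- A's increment loop: values add the per-key dependency counts …
lemma modify_loop_getD (xs : List (String × String)) (d : PySem.Dict String Int) (k : String) :
    (xs.foldl (fun d t => d.modify t.2 0 (· + 1)) d).getD k 0
      = d.getD k 0 + ((xs.map (fun t => t.2)).count k : Int) := by
  have hmap := @List.foldl_map _ _ _ (fun t : String × String => t.2)
    (fun (d : PySem.Dict String Int) x => PySem.Dict.modify d x 0 (· + 1)) xs d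
  rw [← hmap, PySem.Dict.getD_foldl_modify_add_one]

-- … and keys stay unchanged when every touched key is already present
lemma modify_loop_keys (xs : List (String × String)) (d : PySem.Dict String Int)
    (h : ∀ t ∈ xs, t.2 ∈ d.keys) :
    (xs.foldl (fun d t => d.modify t.2 0 (· + 1)) d).keys = d.keys := by
  rw [PySem.Dict.keys_foldl_modify_key xs (fun t => t.2) 0 (fun _ _ v => v + 1) d]
  apply set_update_of_mem
  intro x hx
  simp only [List.mem_map] at hx
  obtain ⟨t, ht, rfl⟩ := hx
  exact h t ht

-- keys of a one-insert-per-key loop from an empty dict: the distinct keys, in order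
lemma keys_fold_insert_fun (f : String → Int) (L : List String) :
    (L.foldl (fun d k => d.insert k (f k)) (PySem.Dict.empty : PySem.Dict String Int)).keys
      = PySem.Set.ofList L := by
  rw [PySem.Dict.keys_foldl_insert L (fun _ k => f k) PySem.Dict.empty]
  simp [PySem.Set.update_nil_left]

-- A, written as an explicit items list over the ordered distinct keys
lemma A_eq (xs : List (String × String)) :
    get_dependency_count xs
      = (PySem.Set.ofList (pvFlat xs)).map
          (fun k => (k, ((xs.map (fun t => t.2)).count k : Int))) := by
  simp only [get_dependency_count]
  rw [fold2_eq_flat (fun _ => 0) xs PySem.Dict.empty]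
  have hk0 := keys_fold_insert_fun (fun _ => 0) (pvFlat xs)
  have hsub : ∀ t ∈ xs,
      t.2 ∈ ((pvFlat xs).foldl (fun d k => d.insert k 0)
        (PySem.Dict.empty : PySem.Dict String Int)).keys := by
    intro t ht
    rw [hk0]
    exact (PySem.Set.mem_ofList (pvFlat xs) t.2).mpr (mem_pvFlat_snd xs t ht)
  have hk1 := modify_loop_keys xs _ hsub
  rw [PySem.Dict.items_eq_map_keys _
      (by rw [hk1, hk0]; exact PySem.Set.nodup_ofList (pvFlat xs)) 0, hk1, hk0]
  apply List.map_congr_left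
  intro k _
  rw [modify_loop_getD, getD_fold_insert_fun]
  split <;> simp

-- B's seen loop is set(pvFlat xs) in first-occurrence order
lemma seen_eq_ofList (xs : List (String × String)) (s : PySem.Set String) :
    xs.foldl (fun s t => PySem.Set.add (PySem.Set.add s t.1) t.2) s
      = PySem.Set.update s (pvFlat xs) := by
  induction xs generalizing s with
  | nil => rfl
  | cons t xs ih => simp [pvFlat, ih, List.flatMap_cons, PySem.Set.update_cons]

-- the per-key filter scan counts second-position appearances
lemma filter_len_eq_count (xs : List (String × String)) (k : String) :
    (xs.filter (fun t => t.2 == k)).length = (xs.map (fun t => t.2)).count k := by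
  rw [List.count, List.countP_eq_length_filter, List.filter_map, List.length_map]
  rfl

lemma B_eq (xs : List (String × String)) :
    get_dependency_count_alt xs
      = (PySem.Set.ofList (pvFlat xs)).map
          (fun k => (k, ((xs.map (fun t => t.2)).count k : Int))) := by
  simp only [get_dependency_count_alt]
  rw [seen_eq_ofList]
  have : PySem.Set.update (PySem.Set.empty : PySem.Set String) (pvFlat xs)
      = PySem.Set.ofList (pvFlat xs) := by
    rw [PySem.Set.ofList_eq_foldl]; rfl
  rw [this]
  apply List.map_congr_left
  intro k _
  rw [filter_len_eq_count]

-- ===== VERDICT =====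
theorem get_dependency_count_spec : Claim_equal_get_dependency_count := by
  intro xs _
  unfold Spec_get_dependency_count
  rw [A_eq, B_eq]
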